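-- pv_equiv track=rewrite | github.com/DCRasPi/RasPi-Encryption | Encoder.py | ReArrangeBit
-- ===== SOURCE A (Python) =====
-- def ReArrangeBit(BinaryKeyTable, OrderedKeyHash):
--     BinaryString = ['0', '0', '0', '0']
--     i = 0
--     n = 0
--
--
--
--
--     while not n > 3:
--         i = 0
--         while not i > 3:
--             if OrderedKeyHash[i] == n:
--                 BinaryString[n] = BinaryKeyTable[i]
--             i = i + 1
--         n = n + 1
--
--
--     return BinaryString
-- ===== SOURCE B (Python) =====
-- def ReArrangeBit(BinaryKeyTable, OrderedKeyHash):
--     # Scatter pass: place each input bit directly at its target position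
--     # (one linear pass instead of A's nested 4x4 gather scan).
--     BinaryString = ['0', '0', '0', '0']
--     for i in range(4):
--         k = OrderedKeyHash[i]
--         if 0 <= k <= 3:
--             BinaryString[k] = BinaryKeyTable[i]
--     return BinaryString
-- ===== Notes on version B (the rewrite author's own statement) =====
-- stated objective: simpler
-- what changed: Replaced A's nested 4x4 gather (for each output position n, scan all four inputs for OrderedKeyHash[i]==n) with a single scatter pass that writes BinaryKeyTable[i] directly to position OrderedKeyHash[i] when it is in 0..3.
-- outside the precondition, e.g. on ReArrangeBit([], [0, 1, 2, 3]): A raises IndexError, B raises IndexError; on ReArrangeBit(['1', '0', '1', '1'], [2, 0]): A raises IndexError, B raises IndexError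
import Mathlib
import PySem

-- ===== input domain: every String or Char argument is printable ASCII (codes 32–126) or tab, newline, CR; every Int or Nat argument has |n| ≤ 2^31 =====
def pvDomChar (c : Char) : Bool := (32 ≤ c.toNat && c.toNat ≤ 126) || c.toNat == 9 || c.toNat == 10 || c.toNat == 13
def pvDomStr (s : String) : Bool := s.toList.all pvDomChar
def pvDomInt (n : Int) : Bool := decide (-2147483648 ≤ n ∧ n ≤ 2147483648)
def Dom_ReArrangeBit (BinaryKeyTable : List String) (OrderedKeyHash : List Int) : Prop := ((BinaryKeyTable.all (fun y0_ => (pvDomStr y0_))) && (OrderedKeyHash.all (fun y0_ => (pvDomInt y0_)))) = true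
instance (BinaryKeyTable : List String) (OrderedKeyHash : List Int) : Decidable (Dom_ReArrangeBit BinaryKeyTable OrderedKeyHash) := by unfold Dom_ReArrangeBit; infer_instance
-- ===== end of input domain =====

-- B replaces A's nested 4x4 gather scan (for each target position, scan all inputs)
-- with a single scatter pass writing each input bit directly to its target position: simpler, one pass.


-- ===== PORT A =====
-- inner 'while not i > 3' loop; the pyGetD defaults are never reached on Pre_ (every access is in range there)
def aInner (BinaryKeyTable : List String) (OrderedKeyHash : List Int) (n : Nat) (i : Nat) (bs : List String) : List String :=
  if i > 3 then bs
  else aInner BinaryKeyTable OrderedKeyHash n (i + 1)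
    (if PySem.List.pyGetD OrderedKeyHash (i : Int) 0 = (n : Int) then
       bs.set n (PySem.List.pyGetD BinaryKeyTable (i : Int) "")
     else bs)
termination_by 4 - i

-- outer 'while not n > 3' loop
def aOuter (BinaryKeyTable : List String) (OrderedKeyHash : List Int) (n : Nat) (bs : List String) : List String :=
  if n > 3 then bs
  else aOuter BinaryKeyTable OrderedKeyHash (n + 1) (aInner BinaryKeyTable OrderedKeyHash n 0 bs)
termination_by 4 - n

def ReArrangeBit (BinaryKeyTable : List String) (OrderedKeyHash : List Int) : List String :=
  aOuter BinaryKeyTable OrderedKeyHash 0 ["0", "0", "0", "0"]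

-- ===== PORT B =====
-- single scatter pass: for i in range(4), if 0 <= k <= 3 then BinaryString[k] = BinaryKeyTable[i]
def ReArrangeBit_alt (BinaryKeyTable : List String) (OrderedKeyHash : List Int) : List String :=
  (PySem.List.pyRange 0 4 1).foldl
    (fun bs i =>
      let k := PySem.List.pyGetD OrderedKeyHash i 0
      if 0 ≤ k ∧ k ≤ 3 then bs.set k.toNat (PySem.List.pyGetD BinaryKeyTable i "") else bs)
    ["0", "0", "0", "0"]

-- ===== PRECONDITION & SPEC =====
-- Pre_: exactly where Python A returns without raising an IndexError: OrderedKeyHash[0..3] must exist,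
-- and BinaryKeyTable[i] must exist whenever A actually reads it (i.e. when OrderedKeyHash[i] is in 0..3).
def Pre_ReArrangeBit (BinaryKeyTable : List String) (OrderedKeyHash : List Int) : Prop :=
  4 ≤ OrderedKeyHash.length ∧
  ∀ i : Nat, i < 4 → (0 ≤ OrderedKeyHash.getD i 0 ∧ OrderedKeyHash.getD i 0 ≤ 3) → i < BinaryKeyTable.length
instance (BinaryKeyTable : List String) (OrderedKeyHash : List Int) : Decidable (Pre_ReArrangeBit BinaryKeyTable OrderedKeyHash) := by unfold Pre_ReArrangeBit; infer_instance

def pvWitness_ReArrangeBit : List String × List Int := (["1", "0", "1", "1"], [2, 0, 3, 1])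

def Spec_ReArrangeBit (BinaryKeyTable : List String) (OrderedKeyHash : List Int) (out : List String) : Prop := out = ReArrangeBit_alt BinaryKeyTable OrderedKeyHash
instance (BinaryKeyTable : List String) (OrderedKeyHash : List Int) (out : List String) : Decidable (Spec_ReArrangeBit BinaryKeyTable OrderedKeyHash out) := by unfold Spec_ReArrangeBit; infer_instance

-- ===== CLAIM (what is proved, stated in full; the proofs are below) =====
def Claim_equal_ReArrangeBit : Prop := ∀ (BinaryKeyTable : List String) (OrderedKeyHash : List Int), Dom_ReArrangeBit BinaryKeyTable OrderedKeyHash → Pre_ReArrangeBit BinaryKeyTable OrderedKeyHash → Spec_ReArrangeBit BinaryKeyTable OrderedKeyHash (ReArrangeBit BinaryKeyTable OrderedKeyHash)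

-- ===== LEMMAS AND PROOFS =====

-- closed if-form of one inner 'while' pass for target position n
theorem inner_eq (t : List String) (h0 h1 h2 h3 : Int) (hr : List Int) (n : Nat) (bs : List String) :
    aInner t (h0 :: h1 :: h2 :: h3 :: hr) n 0 bs =
      if h3 = (n : Int) then bs.set n (PySem.List.pyGetD t 3 "")
      else if h2 = (n : Int) then bs.set n (PySem.List.pyGetD t 2 "")
      else if h1 = (n : Int) then bs.set n (PySem.List.pyGetD t 1 "")
      else if h0 = (n : Int) then bs.set n (PySem.List.pyGetD t 0 "")
      else bs := by
  simp [aInner, PySem.List.pyGetD_ofNat']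
  split_ifs <;> simp [List.set_set]

theorem inner_length (t : List String) (h0 h1 h2 h3 : Int) (hr : List Int) (n : Nat) (bs : List String) :
    (aInner t (h0 :: h1 :: h2 :: h3 :: hr) n 0 bs).length = bs.length := by
  rw [inner_eq]; split_ifs <;> simp

-- the inner pass for target n ≠ j leaves position j unchanged
theorem inner_get_ne (t : List String) (h0 h1 h2 h3 : Int) (hr : List Int) (n j : Nat) (hnj : n ≠ j)
    (bs : List String) :
    (aInner t (h0 :: h1 :: h2 :: h3 :: hr) n 0 bs)[j]? = bs[j]? := by
  rw [inner_eq]; split_ifs <;> simp [List.getElem?_set_ne hnj]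

-- the value the inner pass leaves at its own target position n
theorem inner_get_eq (t : List String) (h0 h1 h2 h3 : Int) (hr : List Int) (n : Nat)
    (bs : List String) (hb : n < bs.length) :
    (aInner t (h0 :: h1 :: h2 :: h3 :: hr) n 0 bs)[n]? =
      if h3 = (n : Int) then some (PySem.List.pyGetD t 3 "")
      else if h2 = (n : Int) then some (PySem.List.pyGetD t 2 "")
      else if h1 = (n : Int) then some (PySem.List.pyGetD t 1 "")
      else if h0 = (n : Int) then some (PySem.List.pyGetD t 0 "")
      else bs[n]? := by
  rw [inner_eq]; split_ifs <;> simp [hb]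

theorem scat_length (bs : List String) (k : Int) (x : String) :
    ((if 0 ≤ k ∧ k ≤ 3 then bs.set k.toNat x else bs)).length = bs.length := by
  split_ifs <;> simp

-- what one scatter step of B leaves at position j
theorem scat_get (bs : List String) (k : Int) (x : String) (j : Nat) (hj : j < bs.length) :
    ((if 0 ≤ k ∧ k ≤ 3 then bs.set k.toNat x else bs))[j]? =
      if k = (j : Int) ∧ k ≤ 3 then some x else bs[j]? := by
  split_ifs with hc hd hd
  · have hT : k.toNat = j := by omega
    rw [hT]
    simp [hj]
  · have : k.toNat ≠ j := by omega
    simp [List.getElem?_set_ne this]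
  · omega
  · rfl

-- the outer 'while' unrolled into its four inner passes
theorem outer_eq (t : List String) (h : List Int) (bs : List String) :
    aOuter t h 0 bs = aInner t h 3 0 (aInner t h 2 0 (aInner t h 1 0 (aInner t h 0 0 bs))) := by
  unfold aOuter; norm_num
  unfold aOuter; norm_num
  unfold aOuter; norm_num
  unfold aOuter; norm_num
  unfold aOuter; norm_num

theorem gather_eq_scatter (t : List String) (h0 h1 h2 h3 : Int) (hr : List Int) :
    ReArrangeBit t (h0 :: h1 :: h2 :: h3 :: hr) = ReArrangeBit_alt t (h0 :: h1 :: h2 :: h3 :: hr) := by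
  have hrange : PySem.List.pyRange 0 4 1 = [0, 1, 2, 3] := by decide
  simp only [ReArrangeBit, ReArrangeBit_alt, hrange, List.foldl_cons, List.foldl_nil]
  rw [outer_eq]
  norm_num [PySem.List.pyGetD_ofNat']
  apply List.ext_getElem?
  intro j
  by_cases hj4 : j < 4
  · interval_cases j
    · rw [inner_get_ne t h0 h1 h2 h3 hr 3 0 (by decide),
          inner_get_ne t h0 h1 h2 h3 hr 2 0 (by decide),
          inner_get_ne t h0 h1 h2 h3 hr 1 0 (by decide),
          inner_get_eq, scat_get, scat_get, scat_get, scat_get]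
      · simp only [PySem.List.pyGetD_ofNat', List.getD]
        split_ifs <;> first | rfl | omega
      all_goals simp [scat_length]
    · rw [inner_get_ne t h0 h1 h2 h3 hr 3 1 (by decide),
          inner_get_ne t h0 h1 h2 h3 hr 2 1 (by decide),
          inner_get_eq, inner_get_ne t h0 h1 h2 h3 hr 0 1 (by decide),
          scat_get, scat_get, scat_get, scat_get]
      · simp only [PySem.List.pyGetD_ofNat', List.getD]
        split_ifs <;> first | rfl | omega
      all_goals simp [inner_length, scat_length]
    · rw [inner_get_ne t h0 h1 h2 h3 hr 3 2 (by decide),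
          inner_get_eq, inner_get_ne t h0 h1 h2 h3 hr 1 2 (by decide),
          inner_get_ne t h0 h1 h2 h3 hr 0 2 (by decide),
          scat_get, scat_get, scat_get, scat_get]
      · simp only [PySem.List.pyGetD_ofNat', List.getD]
        split_ifs <;> first | rfl | omega
      all_goals simp [inner_length, scat_length]
    · rw [inner_get_eq, inner_get_ne t h0 h1 h2 h3 hr 2 3 (by decide),
          inner_get_ne t h0 h1 h2 h3 hr 1 3 (by decide),
          inner_get_ne t h0 h1 h2 h3 hr 0 3 (by decide),
          scat_get, scat_get, scat_get, scat_get]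
      · simp only [PySem.List.pyGetD_ofNat', List.getD]
        split_ifs <;> first | rfl | omega
      all_goals simp [inner_length, scat_length]
  · rw [List.getElem?_eq_none (by simp [inner_length]; omega),
        List.getElem?_eq_none (by simp [scat_length]; omega)]

-- ===== VERDICT (by name: the statement is the Claim_ definition above) =====
theorem ReArrangeBit_spec : Claim_equal_ReArrangeBit := by
  intro t h _hdom hpre
  obtain ⟨hl, -⟩ := hpre
  obtain ⟨h0, h1, h2, h3, hr, rfl⟩ : ∃ a b c d r, h = a :: b :: c :: d :: r := by
    match h, hl with
    | a :: b :: c :: d :: r, _ => exact ⟨a, b, c, d, r, rfl⟩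
  unfold Spec_ReArrangeBit
  exact gather_eq_scatter t h0 h1 h2 h3 hr
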